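-- pv_equiv track=rewrite | github.com/Sycrusian/M6-Sprint1-Atividades_Python | main.py | remove_more_than_two_repetitions
-- ===== SOURCE A (Python) =====
-- def remove_more_than_two_repetitions(text):
--     result = ""
--     for i in range(len(text)):
--         if i > 1:
--             if text[i] == text[i-1]:
--                 if text[i] == text[i-2]:
--                     continue
--         result += text[i]
--     return result
-- ===== SOURCE B (Python) =====
-- def remove_more_than_two_repetitions(text):
--     # Split into maximal runs of equal characters, keep at most two of each run.
--     result = ""
--     rest = text
--     while rest:
--         c = rest[0]
--         k = 1
--         while k < len(rest) and rest[k] == c: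
--             k += 1
--         result += rest[:k][:2]
--         rest = rest[k:]
--     return result
-- ===== Notes on version B (the rewrite author's own statement) =====
-- stated objective: alternative
-- what changed: B scans the string as maximal runs of equal characters with a two-pointer inner loop and keeps at most the first two of each run, instead of A's per-index comparison against the two preceding characters.
import Mathlib
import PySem

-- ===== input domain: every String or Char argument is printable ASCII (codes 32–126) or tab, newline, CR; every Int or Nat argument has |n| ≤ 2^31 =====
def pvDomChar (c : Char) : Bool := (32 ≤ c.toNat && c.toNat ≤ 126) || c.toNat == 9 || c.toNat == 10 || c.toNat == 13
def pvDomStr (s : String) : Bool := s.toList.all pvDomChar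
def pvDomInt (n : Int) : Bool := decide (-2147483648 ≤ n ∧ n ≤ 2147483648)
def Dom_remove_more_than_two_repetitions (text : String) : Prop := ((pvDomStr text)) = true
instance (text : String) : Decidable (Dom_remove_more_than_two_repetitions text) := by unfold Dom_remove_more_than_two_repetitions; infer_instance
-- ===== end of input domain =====

-- B keeps at most two characters of each maximal run (two-pointer run scan) instead of
-- A's per-index two-back window; same output, alternative decomposition (no speed claim).

-- ===== PORT A =====
-- Index loop 'for i in range(len(text))'; the three nested ifs with 'continue' are one
-- conjunction here (exact: Python only evaluates text[i-1]/text[i-2] when i > 1, and for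
-- i ≤ 1 the conjunction is false without those conjuncts mattering).
def remove_more_than_two_repetitions (text : String) : String :=
  let l := text.toList
  String.ofList ((PySem.List.pyRange 0 l.length 1).foldl
    (fun result i =>
      if 1 < i ∧ PySem.List.pyGet? l i = PySem.List.pyGet? l (i - 1)
           ∧ PySem.List.pyGet? l i = PySem.List.pyGet? l (i - 2)
      then result
      else result ++ (PySem.List.pyGet? l i).toList) [])

-- ===== PORT B =====
-- inner 'while k < len(rest) and rest[k] == c: k += 1'
def pvCountRun (rest : List Char) (c : Char) (k : Nat) : Nat :=
  if h : k < rest.length then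
    if rest[k] == c then pvCountRun rest c (k + 1) else k
  else k
termination_by rest.length - k

theorem pvCountRun_ge (rest : List Char) (c : Char) (k : Nat) : k ≤ pvCountRun rest c k := by
  unfold pvCountRun
  split
  · split
    · exact le_trans (Nat.le_succ k) (pvCountRun_ge rest c (k + 1))
    · exact le_refl k
  · exact le_refl k
termination_by rest.length - k

-- outer 'while rest: … result += rest[:k][:2]; rest = rest[k:]'
def pvLoopB (result : List Char) (rest : List Char) : List Char :=
  match rest with
  | [] => result
  | c :: cs =>
    let k := pvCountRun (c :: cs) c 1
    pvLoopB (result ++ ((c :: cs).take k).take 2) ((c :: cs).drop k)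
termination_by rest.length
decreasing_by
  have h1 : 1 ≤ pvCountRun (c :: cs) c 1 := pvCountRun_ge (c :: cs) c 1
  simp
  omega

def remove_more_than_two_repetitions_alt (text : String) : String :=
  String.ofList (pvLoopB [] text.toList)

-- ===== PRECONDITION & SPEC =====
def Spec_remove_more_than_two_repetitions (text : String) (out : String) : Prop := out = remove_more_than_two_repetitions_alt text
instance (text : String) (out : String) : Decidable (Spec_remove_more_than_two_repetitions text out) := by unfold Spec_remove_more_than_two_repetitions; infer_instance

-- ===== CLAIM (what is proved, stated in full; the proofs are below) =====
def Claim_equal_remove_more_than_two_repetitions : Prop := ∀ (text : String), Dom_remove_more_than_two_repetitions text → Spec_remove_more_than_two_repetitions text (remove_more_than_two_repetitions text)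

-- ===== LEMMAS AND PROOFS =====

-- Reference function: process the list left to right carrying the previous two characters
-- of the ORIGINAL text; drop a character iff both equal it.
def pvSpecGo (p2 p1 : Option Char) : List Char → List Char
  | [] => []
  | c :: cs =>
    if p1 = some c ∧ p2 = some c then pvSpecGo p1 (some c) cs
    else c :: pvSpecGo p1 (some c) cs

-- the character d positions before index i in l, none if off the front
def pvPrev (l : List Char) (i d : Nat) : Option Char :=
  if d ≤ i then l[i - d]? else none

theorem pvTake_takeWhile (l : List Char) (p : Char → Bool) :
    l.take (l.takeWhile p).length = l.takeWhile p := by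
  induction l with
  | nil => rfl
  | cons c cs ih =>
    by_cases h : p c
    · simp [h, ih]
    · simp [h]

theorem pvDrop_takeWhile (l : List Char) (p : Char → Bool) :
    l.drop (l.takeWhile p).length = l.dropWhile p := by
  induction l with
  | nil => rfl
  | cons c cs ih =>
    by_cases h : p c
    · simp [h, ih]
    · simp [h]

theorem pvCountRun_spec (c : Char) (rest : List Char) (k : Nat) :
    pvCountRun rest c k = k + ((rest.drop k).takeWhile (· == c)).length := by
  unfold pvCountRun
  split
  · rename_i h
    have hd : rest.drop k = rest[k] :: rest.drop (k + 1) := List.drop_eq_getElem_cons h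
    split
    · rename_i hc
      rw [pvCountRun_spec c rest (k + 1), hd, List.takeWhile_cons, if_pos hc]
      simp
      omega
    · rename_i hc
      rw [hd, List.takeWhile_cons, if_neg hc]
      simp
  · rename_i h
    rw [List.drop_eq_nil_of_le (by omega)]
    simp
termination_by rest.length - k

-- dropping a whole tail-of-run when the previous two characters already equal c
theorem pvSpecGo_all (c : Char) (r rest : List Char) (h : ∀ x ∈ r, x = c) :
    pvSpecGo (some c) (some c) (r ++ rest) = pvSpecGo (some c) (some c) rest := by
  induction r with
  | nil => rfl
  | cons x xs ih =>
    have hx : x = c := h x (by simp)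
    subst hx
    rw [List.cons_append, pvSpecGo,
      if_pos (⟨rfl, rfl⟩ : (some x : Option Char) = some x ∧ (some x : Option Char) = some x)]
    exact ih (fun y hy => h y (by simp [hy]))

-- pvSpecGo does not depend on p2 when p1 differs from the head
theorem pvSpecGo_p2_irrel (p2 p2' p1 : Option Char) (c : Char) (cs : List Char)
    (h : p1 ≠ some c) : pvSpecGo p2 p1 (c :: cs) = pvSpecGo p2' p1 (c :: cs) := by
  simp only [pvSpecGo]
  rw [if_neg (by rintro ⟨h1, -⟩; exact h h1), if_neg (by rintro ⟨h1, -⟩; exact h h1)]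

theorem pvLoopB_eq (rest : List Char) (acc : List Char) (p2 p1 : Option Char)
    (hinv : ∀ c cs, rest = c :: cs → p1 ≠ some c) :
    pvLoopB acc rest = acc ++ pvSpecGo p2 p1 rest := by
  match rest with
  | [] => simp [pvLoopB, pvSpecGo]
  | c :: cs =>
    have hp1 : p1 ≠ some c := hinv c cs rfl
    have hk : pvCountRun (c :: cs) c 1 = 1 + (cs.takeWhile (· == c)).length := by
      rw [pvCountRun_spec]; rfl
    have hcs : cs = cs.takeWhile (· == c) ++ cs.dropWhile (· == c) :=
      (List.takeWhile_append_dropWhile).symm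
    have htake : (c :: cs).take (pvCountRun (c :: cs) c 1)
        = c :: cs.takeWhile (· == c) := by
      rw [hk, Nat.add_comm, List.take_succ_cons, pvTake_takeWhile]
    have hdrop : (c :: cs).drop (pvCountRun (c :: cs) c 1)
        = cs.dropWhile (· == c) := by
      rw [hk, Nat.add_comm, List.drop_succ_cons, pvDrop_takeWhile]
    have htwall : ∀ x ∈ cs.takeWhile (· == c), x = c := by
      intro x hx
      simpa using List.mem_takeWhile_imp hx
    have hdwinv : ∀ d ds, cs.dropWhile (· == c) = d :: ds → (some c : Option Char) ≠ some d := by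
      intro d ds hdd hcd
      have hnd := List.head?_dropWhile_not (· == c) cs
      rw [hdd] at hnd
      simp at hnd
      injection hcd with h'
      exact hnd h'.symm
    rw [pvLoopB]
    simp only [htake, hdrop]
    rw [pvLoopB_eq (cs.dropWhile (· == c)) _ (some c) (some c) hdwinv]
    have hstep1 : pvSpecGo p2 p1 (c :: cs) = c :: pvSpecGo p1 (some c) cs := by
      rw [pvSpecGo, if_neg (by rintro ⟨h1, -⟩; exact hp1 h1)]
    rw [hstep1]
    conv_rhs => rw [hcs]
    match htw : cs.takeWhile (· == c) with
    | [] =>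
      simp only [List.nil_append]
      match hdd : cs.dropWhile (· == c) with
      | [] => simp [pvSpecGo]
      | d :: ds =>
        have hne : (some c : Option Char) ≠ some d := hdwinv d ds hdd
        rw [pvSpecGo_p2_irrel (some c) p1 (some c) d ds (fun h => hne h)]
        simp [List.append_assoc]
    | c2 :: tw' =>
      have hc2 : c2 = c := htwall c2 (by rw [htw]; simp)
      subst hc2
      have hall' : ∀ x ∈ tw', x = c2 := fun x hx => htwall x (by rw [htw]; simp [hx])
      have hstep2 : pvSpecGo p1 (some c2) (c2 :: (tw' ++ cs.dropWhile (· == c2))) =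
          c2 :: pvSpecGo (some c2) (some c2) (tw' ++ cs.dropWhile (· == c2)) := by
        rw [pvSpecGo, if_neg (by rintro ⟨-, h2⟩; exact hp1 h2)]
      rw [List.cons_append, hstep2, pvSpecGo_all c2 tw' _ hall']
      simp [List.append_assoc]
termination_by rest.length
decreasing_by
  have := List.length_dropWhile_le (fun x => x == c) cs
  simp
  omega

-- the body of A's fold, as a named function of the fixed list l
def pvBodyA (l : List Char) (result : List Char) (i : Int) : List Char :=
  if 1 < i ∧ PySem.List.pyGet? l i = PySem.List.pyGet? l (i - 1)
       ∧ PySem.List.pyGet? l i = PySem.List.pyGet? l (i - 2)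
  then result
  else result ++ (PySem.List.pyGet? l i).toList

theorem pvFoldA_eq (l : List Char) (i : Nat) (acc : List Char) (hi : i ≤ l.length) :
    (PySem.List.pyRange (i : Int) (l.length : Int) 1).foldl (pvBodyA l) acc
      = acc ++ pvSpecGo (pvPrev l i 2) (pvPrev l i 1) (l.drop i) := by
  by_cases h : i < l.length
  · rw [PySem.List.pyRange_one_cons (by exact_mod_cast h), List.foldl_cons]
    have hstep : ((i : Int) + 1) = ((i + 1 : Nat) : Int) := by push_cast; ring
    rw [hstep, pvFoldA_eq l (i + 1) (pvBodyA l acc i) (by omega)]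
    have hdrop : l.drop i = l[i] :: l.drop (i + 1) := List.drop_eq_getElem_cons h
    have hgi : PySem.List.pyGet? l (i : Int) = some l[i] := by
      simp [PySem.List.pyGet?_natCast, List.getElem?_eq_getElem h]
    have hp1' : pvPrev l (i + 1) 1 = some l[i] := by
      simp [pvPrev, List.getElem?_eq_getElem h]
    have hp2' : pvPrev l (i + 1) 2 = pvPrev l i 1 := by
      rcases Nat.eq_zero_or_pos i with h0 | h0
      · subst h0; simp [pvPrev]
      · simp only [pvPrev, if_pos (by omega : 2 ≤ i + 1), if_pos (by omega : 1 ≤ i),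
          (by omega : i + 1 - 2 = i - 1)]
    have key : pvBodyA l acc (i : Int) =
        if pvPrev l i 1 = some l[i] ∧ pvPrev l i 2 = some l[i] then acc
        else acc ++ [l[i]] := by
      unfold pvBodyA
      rw [hgi]
      by_cases h2 : 2 ≤ i
      · have e1 : ((i : Int) - 1) = ((i - 1 : Nat) : Int) := by omega
        have e2 : ((i : Int) - 2) = ((i - 2 : Nat) : Int) := by omega
        have hg1 : PySem.List.pyGet? l ((i : Int) - 1) = some l[i - 1] := by
          rw [e1]; simp [PySem.List.pyGet?_natCast,
            List.getElem?_eq_getElem (by omega : i - 1 < l.length)]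
        have hg2 : PySem.List.pyGet? l ((i : Int) - 2) = some l[i - 2] := by
          rw [e2]; simp [PySem.List.pyGet?_natCast,
            List.getElem?_eq_getElem (by omega : i - 2 < l.length)]
        have hpv1 : pvPrev l i 1 = some l[i - 1] := by
          simp [pvPrev, List.getElem?_eq_getElem (by omega : i - 1 < l.length),
            (by omega : 1 ≤ i)]
        have hpv2 : pvPrev l i 2 = some l[i - 2] := by
          simp [pvPrev, List.getElem?_eq_getElem (by omega : i - 2 < l.length), h2]
        rw [hg1, hg2, hpv1, hpv2]
        by_cases hcond : l[i - 1] = l[i] ∧ l[i - 2] = l[i]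
        · rw [if_pos ⟨by exact_mod_cast (by omega : (1:Int) < (i:Int)),
              by rw [hcond.1], by rw [hcond.2]⟩,
            if_pos ⟨by rw [hcond.1], by rw [hcond.2]⟩]
        · have hne1 : ¬ (1 < (i : Int) ∧ (some l[i] : Option Char) = some l[i - 1]
              ∧ (some l[i] : Option Char) = some l[i - 2]) := by
            rintro ⟨-, hb, hc⟩
            injection hb with hb'
            injection hc with hc'
            exact hcond ⟨hb'.symm, hc'.symm⟩
          have hne2 : ¬ ((some l[i - 1] : Option Char) = some l[i]
              ∧ (some l[i - 2] : Option Char) = some l[i]) := by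
            rintro ⟨ha, hb⟩
            injection ha with ha'
            injection hb with hb'
            exact hcond ⟨ha', hb'⟩
          rw [if_neg hne1, if_neg hne2]
          rfl
      · have hne1 : ¬ (1 < (i : Int) ∧ (some l[i] : Option Char) = PySem.List.pyGet? l ((i : Int) - 1)
            ∧ (some l[i] : Option Char) = PySem.List.pyGet? l ((i : Int) - 2)) := by
          rintro ⟨h1, -⟩
          omega
        have hne2 : ¬ (pvPrev l i 1 = some l[i] ∧ pvPrev l i 2 = some l[i]) := by
          rintro ⟨ha, hb⟩
          have hi2 : i < 2 := by omega
          interval_cases i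
          · simp [pvPrev] at ha
          · simp [pvPrev] at hb
        rw [if_neg hne1, if_neg hne2]
        rfl
    rw [hdrop, hp1', hp2', key]
    conv_rhs => rw [pvSpecGo]
    by_cases hc : pvPrev l i 1 = some l[i] ∧ pvPrev l i 2 = some l[i]
    · rw [if_pos hc, if_pos ⟨hc.1, hc.2⟩]
    · rw [if_neg hc, if_neg (by rintro ⟨h1, h2⟩; exact hc ⟨h1, h2⟩)]
      simp [List.append_assoc]
  · have hi' : i = l.length := by omega
    subst hi'
    rw [PySem.List.pyRange_one_eq_nil (le_refl _), List.drop_length]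
    simp [pvSpecGo]
termination_by l.length - i

-- ===== VERDICT (by name: the statement is the Claim_ definition above) =====
theorem remove_more_than_two_repetitions_spec : Claim_equal_remove_more_than_two_repetitions := by
  intro text _
  unfold Spec_remove_more_than_two_repetitions
  unfold remove_more_than_two_repetitions remove_more_than_two_repetitions_alt
  set l := text.toList with hl
  have hA : (PySem.List.pyRange 0 (l.length : Int) 1).foldl (pvBodyA l) []
      = pvSpecGo none none l := by
    have := pvFoldA_eq l 0 [] (by omega)
    simpa [pvPrev] using this
  have hB : pvLoopB [] l = pvSpecGo none none l := by
    have := pvLoopB_eq l [] none none (by intro c cs _; simp)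
    simpa using this
  rw [hB, ← hA]
  rfl
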